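-- pv_equiv track=rewrite | github.com/mevljas/Programming-1 | Exercises/Namespaces,What_are_variables, Functions/Naloge-dodatne_algoritmične.py | nic_ena
-- ===== SOURCE A (Python) =====
-- def nic_ena(xs):
--     ones_left = 0
--     zeros_right = xs.count(0)
--     count = [zeros_right]
--     for x in xs:
--         if x == 0:
--             zeros_right -= 1
--         else:
--             ones_left += 1
--         count.append(ones_left + zeros_right)
--     return min(count)
-- ===== SOURCE B (Python) =====
-- def nic_ena(xs):
--     ones = 0
--     res = 0
--     for x in xs:
--         if x != 0:
--             ones += 1
--         else:
--             res = min(res + 1, ones)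
--     return res
-- ===== Notes on version B (the rewrite author's own statement) =====
-- stated objective: faster
-- what changed: Replaces A's build-the-whole-cost-list-then-min approach (count zeros up front, append ones_left+zeros_right at every split, min over the list) with the classic one-pass DP recurrence res = min(res+1, ones) on each zero, keeping only two scalars.
import Mathlib
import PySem

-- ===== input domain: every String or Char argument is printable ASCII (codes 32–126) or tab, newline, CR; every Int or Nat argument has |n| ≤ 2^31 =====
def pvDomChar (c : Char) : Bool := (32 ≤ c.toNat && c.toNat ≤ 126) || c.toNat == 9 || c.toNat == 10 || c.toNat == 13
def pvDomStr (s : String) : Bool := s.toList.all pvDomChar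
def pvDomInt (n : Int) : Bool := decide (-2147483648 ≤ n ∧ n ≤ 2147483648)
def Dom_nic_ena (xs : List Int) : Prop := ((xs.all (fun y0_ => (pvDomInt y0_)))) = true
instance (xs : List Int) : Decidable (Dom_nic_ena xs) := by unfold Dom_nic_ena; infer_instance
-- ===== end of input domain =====

-- B replaces A's three passes (count zeros, build the list of split costs, min over it)
-- with the classic one-pass DP recurrence res = min(res+1, ones), for a constant-factor speedup.

-- ===== PORT A =====
-- loop body of A: state = (ones_left, zeros_right, count)
def nicEnaStepA (s : Int × Int × List Int) (x : Int) : Int × Int × List Int :=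
  if x == 0 then (s.1, s.2.1 - 1, s.2.2 ++ [s.1 + (s.2.1 - 1)])
  else (s.1 + 1, s.2.1, s.2.2 ++ [(s.1 + 1) + s.2.1])

def nic_ena (xs : List Int) : Int :=
  let zr0 : Int := (xs.count 0 : Int)
  let s := xs.foldl nicEnaStepA (0, zr0, [zr0])
  -- min(count): count always starts with [zr0], so it is nonempty and the default is unreachable
  (PySem.List.min? s.2.2 (fun y => y)).getD 0

-- ===== PORT B =====
-- loop body of B: state = (ones, res)
def nicEnaStepB (s : Int × Int) (x : Int) : Int × Int :=
  if x ≠ 0 then (s.1 + 1, s.2) else (s.1, min (s.2 + 1) s.1)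

def nic_ena_alt (xs : List Int) : Int :=
  (xs.foldl nicEnaStepB (0, 0)).2

-- ===== PRECONDITION & SPEC =====
def Spec_nic_ena (xs : List Int) (out : Int) : Prop := out = nic_ena_alt xs
instance (xs : List Int) (out : Int) : Decidable (Spec_nic_ena xs out) := by unfold Spec_nic_ena; infer_instance

-- ===== CLAIM (what is proved, stated in full; the proofs are below) =====
def Claim_equal_nic_ena : Prop := ∀ (xs : List Int), Dom_nic_ena xs → Spec_nic_ena xs (nic_ena xs)

-- ===== LEMMAS AND PROOFS =====

-- the list of split costs c_i = ones(xs[:i]) + zeros(xs[i:]), starting from `ol` ones already seen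
def nicEnaCosts (ol : Int) : List Int → List Int
  | [] => [ol]
  | x :: t => (ol + (((x :: t).count 0 : Int))) :: (if x = 0 then nicEnaCosts ol t else nicEnaCosts (ol + 1) t)

lemma costs_head (ol : Int) (t : List Int) :
    nicEnaCosts ol t = (ol + (t.count 0 : Int)) :: (nicEnaCosts ol t).tail := by
  cases t with
  | nil => simp [nicEnaCosts]
  | cons y u => simp [nicEnaCosts]

lemma foldA_eq : ∀ (t : List Int) (ol : Int) (cnt : List Int),
    t.foldl nicEnaStepA (ol, (t.count 0 : Int), cnt)
      = (ol + (t.countP (fun x => !(x == 0)) : Int), 0, cnt ++ (nicEnaCosts ol t).tail) := by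
  intro t
  induction t with
  | nil => intro ol cnt; simp [nicEnaCosts]
  | cons x t ih =>
    intro ol cnt
    by_cases hx : x = 0
    · subst hx
      have h1 : (((0 : Int) :: t).count 0 : Int) = (t.count 0 : Int) + 1 := by
        simp [List.count_cons]
      rw [List.foldl_cons, h1]
      have h2 : nicEnaStepA (ol, (t.count 0 : Int) + 1, cnt) 0
          = (ol, (t.count 0 : Int), cnt ++ [ol + (t.count 0 : Int)]) := by
        simp [nicEnaStepA]
      rw [h2, ih]
      refine Prod.ext (by simp [List.countP_cons]) (Prod.ext rfl ?_)
      show cnt ++ [ol + (t.count 0 : Int)] ++ (nicEnaCosts ol t).tail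
          = cnt ++ (nicEnaCosts ol ((0 : Int) :: t)).tail
      have h3 : (nicEnaCosts ol ((0 : Int) :: t)).tail = nicEnaCosts ol t := by
        simp [nicEnaCosts]
      rw [h3, costs_head ol t]
      simp
    · have h1 : (((x : Int) :: t).count 0 : Int) = (t.count 0 : Int) := by
        simp [List.count_cons, hx]
      rw [List.foldl_cons, h1]
      have h2 : nicEnaStepA (ol, (t.count 0 : Int), cnt) x
          = (ol + 1, (t.count 0 : Int), cnt ++ [(ol + 1) + (t.count 0 : Int)]) := by
        simp [nicEnaStepA, hx]
      rw [h2, ih]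
      refine Prod.ext (by simp [List.countP_cons, hx]; ring) (Prod.ext rfl ?_)
      show cnt ++ [(ol + 1) + (t.count 0 : Int)] ++ (nicEnaCosts (ol + 1) t).tail
          = cnt ++ (nicEnaCosts ol (x :: t)).tail
      have h3 : (nicEnaCosts ol (x :: t)).tail = nicEnaCosts (ol + 1) t := by
        simp [nicEnaCosts, hx]
      rw [h3, costs_head (ol + 1) t]
      simp

lemma foldB_eq : ∀ (t : List Int) (ol r : Int), r ≤ ol →
    (t.foldl nicEnaStepB (ol, r)).2
      = ((nicEnaCosts ol t).tail).foldl min (r + (t.count 0 : Int)) := by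
  intro t
  induction t with
  | nil => intro ol r _; simp [nicEnaCosts]
  | cons x t ih =>
    intro ol r hr
    by_cases hx : x = 0
    · subst hx
      have h2 : nicEnaStepB (ol, r) 0 = (ol, min (r + 1) ol) := by simp [nicEnaStepB]
      rw [List.foldl_cons, h2, ih ol (min (r + 1) ol) (by omega)]
      have h3 : (nicEnaCosts ol ((0 : Int) :: t)).tail = nicEnaCosts ol t := by
        simp [nicEnaCosts]
      rw [h3]
      conv_rhs => rw [costs_head ol t]
      rw [List.foldl_cons]
      congr 1
      have : (((0 : Int) :: t).count 0 : Int) = (t.count 0 : Int) + 1 := by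
        simp [List.count_cons]
      rw [this]
      omega
    · have h2 : nicEnaStepB (ol, r) x = (ol + 1, r) := by simp [nicEnaStepB, hx]
      rw [List.foldl_cons, h2, ih (ol + 1) r (by omega)]
      have h3 : (nicEnaCosts ol (x :: t)).tail = nicEnaCosts (ol + 1) t := by
        simp [nicEnaCosts, hx]
      rw [h3]
      conv_rhs => rw [costs_head (ol + 1) t]
      rw [List.foldl_cons]
      congr 1
      have : (((x : Int) :: t).count 0 : Int) = (t.count 0 : Int) := by
        simp [List.count_cons, hx]
      rw [this]
      omega

-- ===== VERDICT (by name: the statement is the Claim_ definition above) =====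
theorem nic_ena_spec : Claim_equal_nic_ena := by
  intro xs _
  show (nic_ena xs) = nic_ena_alt xs
  simp only [nic_ena, nic_ena_alt]
  rw [foldA_eq xs 0 [(xs.count 0 : Int)], foldB_eq xs 0 0 le_rfl]
  simp only [List.singleton_append]
  rw [PySem.List.min?_id_cons, Option.getD_some]
  rw [zero_add]
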